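-- pv_equiv track=rewrite | github.com/bartkowiaktomasz/algorithmic-challenges | HackerRank - Interview Preparation Kit/Stacks and Queues/PoisonousPlants.py | build_non_increasing_stacks
-- ===== SOURCE A (Python) =====
-- def build_non_increasing_stacks(p):
--     """Partition `p` into list of non-increasing stacks"""
--     stacks = []
--     cur_stack = [p[0]]
--     for elem in p[1:]:
--         if elem <= cur_stack[-1]:
--             cur_stack.append(elem)
--         else:
--             stacks.append(cur_stack)
--             cur_stack = [elem]
--     if cur_stack:
--         stacks.append(cur_stack)
--     return stacks
-- ===== SOURCE B (Python) =====
-- def build_non_increasing_stacks(p):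
--     """Partition `p` into list of non-increasing stacks.
--
--     Boundary-index decomposition: compute the indices where a new run starts
--     (p[i] > p[i-1]), then cut p into slices at those boundaries."""
--     n = len(p)
--     cuts = [0] + [i for i in range(1, n) if p[i] > p[i - 1]] + [n]
--     return [p[a:b] for a, b in zip(cuts, cuts[1:])]
-- ===== Notes on version B (the rewrite author's own statement) =====
-- stated objective: alternative
-- what changed: Replaces the running-stack accumulator loop (extend or flush cur_stack element by element) with a two-phase boundary decomposition: first collect the run-start indices i with p[i] > p[i-1], then cut p into slices between consecutive boundaries.
import Mathlib
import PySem

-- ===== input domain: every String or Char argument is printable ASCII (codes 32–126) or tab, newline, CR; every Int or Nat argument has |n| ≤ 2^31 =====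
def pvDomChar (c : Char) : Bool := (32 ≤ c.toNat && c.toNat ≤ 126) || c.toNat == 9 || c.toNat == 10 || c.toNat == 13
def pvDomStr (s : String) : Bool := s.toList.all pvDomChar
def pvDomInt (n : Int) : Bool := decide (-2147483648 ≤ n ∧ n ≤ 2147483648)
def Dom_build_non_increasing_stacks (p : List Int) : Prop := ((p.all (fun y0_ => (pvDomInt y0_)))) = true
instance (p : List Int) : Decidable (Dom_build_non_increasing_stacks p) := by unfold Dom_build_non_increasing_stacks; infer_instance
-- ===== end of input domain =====

-- B partitions with a boundary-index decomposition instead of A's running-stack loop; same O(n) cost (objective: alternative).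

-- ===== PORT A =====
-- A's for-loop over p[1:] as structural recursion with state (stks, cur_stack);
-- the nil case carries the trailing 'if cur_stack: stks.append(cur_stack)'.
def aLoopBNS (stks : List (List Int)) (cur : List Int) : List Int → List (List Int)
  | [] => if cur ≠ [] then stks ++ [cur] else stks
  | e :: rest =>
    -- cur_stack[-1]: cur is never empty when the loop body runs, so the .getD default is never read
    if e ≤ (PySem.List.pyGet? cur (-1)).getD 0 then aLoopBNS stks (cur ++ [e]) rest
    else aLoopBNS (stks ++ [cur]) [e] rest

def build_non_increasing_stacks (p : List Int) : List (List Int) :=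
  match PySem.List.pyGet? p 0 with
  | none => []   -- IndexError reading the first element of an empty p; excluded by Pre_
  | some h => aLoopBNS [] [h] (PySem.List.slice p (some 1) none)

-- ===== PORT B =====
def build_non_increasing_stacks_alt (p : List Int) : List (List Int) :=
  let n : Int := (p.length : Int)
  let cuts : List Int :=
    0 :: (((PySem.List.pyRange 1 n 1).filter
            (fun i => decide (PySem.List.pyGetD p (i-1) 0 < PySem.List.pyGetD p i 0))) ++ [n])
  (cuts.zip cuts.tail).map (fun ab => PySem.List.slice p (some ab.1) (some ab.2))

-- ===== PRECONDITION & SPEC =====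
-- Pre_ excludes only the empty list, on which A raises IndexError reading the first element.
def Pre_build_non_increasing_stacks (p : List Int) : Prop := p ≠ []
instance (p : List Int) : Decidable (Pre_build_non_increasing_stacks p) := by unfold Pre_build_non_increasing_stacks; infer_instance
def pvWitness_build_non_increasing_stacks : List Int := [3, 1, 2]

def Spec_build_non_increasing_stacks (p : List Int) (out : List (List Int)) : Prop := out = build_non_increasing_stacks_alt p
instance (p : List Int) (out : List (List Int)) : Decidable (Spec_build_non_increasing_stacks p out) := by unfold Spec_build_non_increasing_stacks; infer_instance

-- ===== CLAIM (what is proved, stated in full; the proofs are below) =====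
def Claim_equal_build_non_increasing_stacks : Prop := ∀ (p : List Int), Dom_build_non_increasing_stacks p → Pre_build_non_increasing_stacks p → Spec_build_non_increasing_stacks p (build_non_increasing_stacks p)

-- ===== LEMMAS AND PROOFS =====

-- Common reference function: one right fold, merging each element into the first run.
def stepBNS (x : Int) (runs : List (List Int)) : List (List Int) :=
  match runs with
  | (y :: r) :: rs => if y ≤ x then (x :: y :: r) :: rs else [x] :: ((y :: r) :: rs)
  | rs => [x] :: rs

def FBNS (p : List Int) : List (List Int) := p.foldr stepBNS []

theorem FBNS_cons_shape (x : Int) (l : List Int) : ∃ r rs, FBNS (x :: l) = (x :: r) :: rs := by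
  have hF : FBNS (x :: l) = stepBNS x (FBNS l) := rfl
  rw [hF]
  cases hFl : FBNS l with
  | nil => exact ⟨[], [], rfl⟩
  | cons hd tl =>
    cases hd with
    | nil => exact ⟨[], [] :: tl, rfl⟩
    | cons y r =>
      by_cases hyx : y ≤ x
      · exact ⟨y :: r, tl, by simp [stepBNS, hyx]⟩
      · exact ⟨[], (y :: r) :: tl, by simp [stepBNS, hyx]⟩

-- A-side: merging a nonempty current stack into the fold result.
def mergeBNS (cur : List Int) (runs : List (List Int)) : List (List Int) :=
  match runs with
  | (y :: r) :: rs => if y ≤ (cur.getLast?).getD 0 then (cur ++ y :: r) :: rs else cur :: ((y :: r) :: rs)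
  | rs => cur :: rs

theorem aLoopBNS_eq_merge (rest : List Int) : ∀ (cur : List Int) (stks : List (List Int)), cur ≠ [] →
    aLoopBNS stks cur rest = stks ++ mergeBNS cur (FBNS rest) := by
  induction rest with
  | nil => intro cur stks hc; simp [aLoopBNS, hc, FBNS, mergeBNS]
  | cons e rest ih =>
    intro cur stks hc
    have hstep : aLoopBNS stks cur (e :: rest) =
        if e ≤ (PySem.List.pyGet? cur (-1)).getD 0 then aLoopBNS stks (cur ++ [e]) rest
        else aLoopBNS (stks ++ [cur]) [e] rest := rfl
    have hF : FBNS (e :: rest) = stepBNS e (FBNS rest) := rfl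
    rw [hstep, PySem.List.pyGet?_neg_one, hF]
    by_cases hle : e ≤ (cur.getLast?).getD 0
    · rw [if_pos hle, ih (cur ++ [e]) stks (by simp)]
      congr 1
      generalize FBNS rest = runs
      match runs with
      | [] => simp [stepBNS, mergeBNS, hle]
      | [] :: rs => simp [stepBNS, mergeBNS, hle]
      | (y :: r) :: rs =>
        by_cases hy : y ≤ e
        · simp [stepBNS, mergeBNS, hle, hy]
        · simp [stepBNS, mergeBNS, hle, hy]
    · rw [if_neg hle, ih [e] (stks ++ [cur]) (by simp), List.append_assoc]
      congr 1
      generalize FBNS rest = runs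
      match runs with
      | [] => simp [stepBNS, mergeBNS, hle]
      | [] :: rs => simp [stepBNS, mergeBNS, hle]
      | (y :: r) :: rs =>
        by_cases hy : y ≤ e
        · simp [stepBNS, mergeBNS, hle, hy]
        · simp [stepBNS, mergeBNS, hle, hy]

theorem A_eq_FBNS (h : Int) (t : List Int) :
    build_non_increasing_stacks (h :: t) = FBNS (h :: t) := by
  have h0 : build_non_increasing_stacks (h :: t) = aLoopBNS [] [h] t := by
    simp [build_non_increasing_stacks, PySem.List.slice_from_one]
  rw [h0, aLoopBNS_eq_merge t [h] [] (by simp), List.nil_append]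
  have hF : FBNS (h :: t) = stepBNS h (FBNS t) := rfl
  rw [hF]
  generalize FBNS t = runs
  match runs with
  | [] => simp [stepBNS, mergeBNS]
  | [] :: rs => simp [stepBNS, mergeBNS]
  | (y :: r) :: rs =>
    by_cases hy : y ≤ h
    · simp [stepBNS, mergeBNS, hy]
    · simp [stepBNS, mergeBNS, hy]

-- B-side helpers (cutsB p is exactly the filtered boundary list of the port).
def cutsB (p : List Int) : List Int :=
  (PySem.List.pyRange 1 (p.length : Int) 1).filter
    (fun i => decide (PySem.List.pyGetD p (i-1) 0 < PySem.List.pyGetD p i 0))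

def pairsMapBNS (q : List Int) (c : List Int) : List (List Int) :=
  (c.zip c.tail).map (fun ab => PySem.List.slice q (some ab.1) (some ab.2))

theorem B_unfold (p : List Int) :
    build_non_increasing_stacks_alt p = pairsMapBNS p (0 :: (cutsB p ++ [(p.length : Int)])) := rfl

theorem cutsB_nat (q : List Int) :
    cutsB q = ((List.range (q.length - 1)).filter
        (fun k => decide (q.getD k 0 < q.getD (k+1) 0))).map (fun k : Nat => (1 : Int) + k) := by
  unfold cutsB
  rw [PySem.List.pyRange_one]
  have h1 : (((q.length : Int)) - 1).toNat = q.length - 1 := by omega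
  rw [h1, List.filter_map]
  have hcong : ∀ k ∈ List.range (q.length - 1),
      ((fun i => decide (PySem.List.pyGetD q (i-1) 0 < PySem.List.pyGetD q i 0)) ∘ (fun k : Nat => (1 : Int) + k)) k
        = decide (q.getD k 0 < q.getD (k+1) 0) := by
    intro k _
    have e1 : (1 : Int) + (k : Int) - 1 = (k : Int) := by ring
    have e2 : (1 : Int) + (k : Int) = ((k + 1 : Nat) : Int) := by push_cast; ring
    simp only [Function.comp_apply]
    rw [e1, e2]
    simp only [PySem.List.pyGetD_natCast]
  rw [List.filter_congr hcong]

theorem cutsB_cons (h e : Int) (rest : List Int) :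
    cutsB (h :: e :: rest) = (if h < e then [(1:Int)] else []) ++ (cutsB (e :: rest)).map (· + 1) := by
  rw [cutsB_nat, cutsB_nat]
  have hlp : (h :: e :: rest).length - 1 = rest.length + 1 := by simp
  have hlt : (e :: rest).length - 1 = rest.length := by simp
  rw [hlp, hlt, List.range_succ_eq_map, List.filter_cons, List.filter_map]
  have hp0 : (decide ((h :: e :: rest).getD 0 0 < (h :: e :: rest).getD (0+1) 0)) = decide (h < e) := by
    simp
  have hcomp : ∀ k ∈ List.range rest.length,
      ((fun k => decide ((h :: e :: rest).getD k 0 < (h :: e :: rest).getD (k+1) 0)) ∘ Nat.succ) k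
        = (fun k => decide ((e :: rest).getD k 0 < (e :: rest).getD (k+1) 0)) k := by
    intro k _
    simp [Function.comp]
  rw [List.filter_congr hcomp]
  by_cases hbe : h < e
  · rw [hp0, if_pos (by simpa using hbe)]
    simp only [List.map_cons, List.map_map]
    rw [if_pos hbe]
    have hfun : ((fun k : Nat => (1 : Int) + k) ∘ Nat.succ) = ((· + 1) ∘ (fun k : Nat => (1 : Int) + k)) := by
      funext k; simp [Function.comp]; ring
    simp [hfun]
  · rw [hp0, if_neg (by simpa using hbe)]
    simp only [List.map_map]
    rw [if_neg hbe, List.nil_append]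
    have hfun : ((fun k : Nat => (1 : Int) + k) ∘ Nat.succ) = ((· + 1) ∘ (fun k : Nat => (1 : Int) + k)) := by
      funext k; simp [Function.comp]; ring
    simp [hfun]

theorem pairsMapBNS_cons_cons (q : List Int) (a b : Int) (c : List Int) :
    pairsMapBNS q (a :: b :: c) = PySem.List.slice q (some a) (some b) :: pairsMapBNS q (b :: c) := rfl

theorem slice_cons_shift (x : Int) (q : List Int) (a b : Int) (ha : 0 ≤ a) (hb : 0 ≤ b) :
    PySem.List.slice (x :: q) (some (a+1)) (some (b+1)) = PySem.List.slice q (some a) (some b) := by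
  rw [PySem.List.slice_toNat _ (by omega) (by omega), PySem.List.slice_toNat _ ha hb]
  have h1 : (a+1).toNat = a.toNat + 1 := by omega
  have h2 : (b+1).toNat - (a+1).toNat = b.toNat - a.toNat := by omega
  rw [h2, h1, List.drop_succ_cons]

theorem pairsMapBNS_shift (x : Int) (q : List Int) : ∀ (c : List Int), (∀ y ∈ c, 0 ≤ y) →
    pairsMapBNS (x :: q) (c.map (· + 1)) = pairsMapBNS q c := by
  intro c
  induction c with
  | nil => intro _; rfl
  | cons a c ih =>
    intro hc
    cases c with
    | nil => rfl
    | cons b c' =>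
      have ha : 0 ≤ a := hc a (by simp)
      have hb : 0 ≤ b := hc b (by simp)
      simp only [List.map_cons] at *
      rw [pairsMapBNS_cons_cons, pairsMapBNS_cons_cons, slice_cons_shift x q a b ha hb]
      have := ih (fun y hy => hc y (by simp at hy ⊢; tauto))
      rw [this]

theorem cutsB_append_nonneg (t : List Int) : ∀ y ∈ cutsB t ++ [(t.length : Int)], 0 ≤ y := by
  intro y hy
  rcases List.mem_append.mp hy with hy | hy
  · have : y ∈ PySem.List.pyRange 1 (t.length : Int) 1 := List.mem_of_mem_filter hy
    have := (PySem.List.mem_pyRange_one).mp this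
    omega
  · simp at hy; omega

theorem slice_zero_cons_succ (x : Int) (q : List Int) (b : Int) (hb : 0 ≤ b) :
    PySem.List.slice (x :: q) (some 0) (some (b+1)) = x :: PySem.List.slice q (some 0) (some b) := by
  rw [PySem.List.slice_toNat _ (by omega) (by omega), PySem.List.slice_toNat _ (by omega) hb]
  simp only [Int.toNat_zero, Nat.sub_zero, List.drop_zero]
  rw [show (b+1).toNat = b.toNat + 1 by omega, List.take_succ_cons]

theorem B_eq_FBNS (t : List Int) : ∀ (h : Int),
    build_non_increasing_stacks_alt (h :: t) = FBNS (h :: t) := by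
  induction t with
  | nil =>
    intro h
    rw [B_unfold]
    have hc : cutsB [h] = [] := by
      unfold cutsB
      rw [PySem.List.pyRange_one_eq_nil (by simp), List.filter_nil]
    rw [hc]
    show pairsMapBNS [h] [0, 1] = FBNS [h]
    have : PySem.List.slice [h] (some 0) (some 1) = [h] := by
      rw [PySem.List.slice_toNat _ (by omega) (by omega)]; rfl
    simp [pairsMapBNS, this, FBNS, stepBNS]
  | cons e rest ih =>
    intro h
    obtain ⟨r, rs, hFt⟩ := FBNS_cons_shape e rest
    have hBt : build_non_increasing_stacks_alt (e :: rest) = (e :: r) :: rs := by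
      rw [ih e, hFt]
    have hnn := cutsB_append_nonneg (e :: rest)
    have hF : FBNS (h :: e :: rest) = stepBNS h (FBNS (e :: rest)) := rfl
    rw [B_unfold, cutsB_cons, hF, hFt]
    have hlen : (((h :: e :: rest).length : Int)) = ((e :: rest).length : Int) + 1 := by simp
    by_cases hbe : h < e
    · rw [if_pos hbe]
      have hsh : (1 : Int) :: ((cutsB (e :: rest)).map (· + 1) ++ [((e :: rest).length : Int) + 1])
          = (0 :: (cutsB (e :: rest) ++ [((e :: rest).length : Int)])).map (· + 1) := by
        simp
      have hlist : 0 :: (([(1:Int)] ++ (cutsB (e :: rest)).map (· + 1)) ++ [(((h :: e :: rest).length : Int))])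
          = 0 :: 1 :: ((cutsB (e :: rest)).map (· + 1) ++ [((e :: rest).length : Int) + 1]) := by
        rw [hlen]; simp
      rw [hlist]
      rw [pairsMapBNS_cons_cons, hsh,
        pairsMapBNS_shift h (e :: rest) _ (by
          intro y hy
          rcases List.mem_cons.mp hy with hy | hy
          · omega
          · exact hnn y hy)]
      rw [← B_unfold, hBt]
      have hs01 : PySem.List.slice (h :: e :: rest) (some 0) (some 1) = [h] := by
        rw [PySem.List.slice_toNat _ (by omega) (by omega)]; rfl
      rw [hs01]
      have : ¬ e ≤ h := by omega
      simp [stepBNS, this]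
    · rw [if_neg hbe, List.nil_append]
      obtain ⟨c0, cs, hl⟩ := List.exists_cons_of_ne_nil
        (show cutsB (e :: rest) ++ [((e :: rest).length : Int)] ≠ [] by simp)
      have hnn' : ∀ y ∈ c0 :: cs, 0 ≤ y := by rw [← hl]; exact hnn
      have hc0 : 0 ≤ c0 := hnn' c0 (by simp)
      have hlist : 0 :: ((cutsB (e :: rest)).map (· + 1) ++ [(((h :: e :: rest).length : Int))])
          = 0 :: (c0 + 1) :: cs.map (· + 1) := by
        rw [hlen]
        have : (cutsB (e :: rest)).map (· + 1) ++ [((e :: rest).length : Int) + 1]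
            = (cutsB (e :: rest) ++ [((e :: rest).length : Int)]).map (· + 1) := by simp
        rw [this, hl]
        simp
      rw [hlist, pairsMapBNS_cons_cons]
      have hsh : (c0 + 1) :: cs.map (· + 1) = ((c0 :: cs).map (· + 1)) := by simp
      rw [hsh, pairsMapBNS_shift h (e :: rest) _ hnn']
      have hBt' : build_non_increasing_stacks_alt (e :: rest)
          = PySem.List.slice (e :: rest) (some 0) (some c0) :: pairsMapBNS (e :: rest) (c0 :: cs) := by
        rw [B_unfold, hl, pairsMapBNS_cons_cons]
      rw [hBt] at hBt'
      have h1 : PySem.List.slice (e :: rest) (some 0) (some c0) = e :: r := (List.cons.injEq _ _ _ _).mp hBt'.symm |>.1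
      have h2 : pairsMapBNS (e :: rest) (c0 :: cs) = rs := (List.cons.injEq _ _ _ _).mp hBt'.symm |>.2
      rw [h2, slice_zero_cons_succ h (e :: rest) c0 hc0, h1]
      have : e ≤ h := by omega
      simp [stepBNS, this]

-- ===== VERDICT (by name: the statement is the Claim_ definition above) =====
theorem build_non_increasing_stacks_spec : Claim_equal_build_non_increasing_stacks := by
  intro p _ hpre
  unfold Spec_build_non_increasing_stacks
  cases p with
  | nil => exact absurd rfl hpre
  | cons h t => rw [A_eq_FBNS, B_eq_FBNS]
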